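-- pv_equiv track=rewrite | github.com/zoey-holt/CodingProblems | CodingProblemsPython/leet_code_problems.py | is_valid_sudoku_section
-- ===== SOURCE A (Python) =====
-- from typing import List
--
-- def is_valid_sudoku_section(section: List[str]) -> bool:
--     checked = []
--     for n in section:
--         if n != '.':
--             if n in checked:
--                 return False
--             checked.append(n)
--     return True
-- ===== SOURCE B (Python) =====
-- from typing import List
--
-- def is_valid_sudoku_section(section: List[str]) -> bool:
--     digits = [n for n in section if n != '.']
--     return len(digits) == len(set(digits))
-- ===== Notes on version B (the rewrite author's own statement) =====
-- stated objective: simpler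
-- what changed: Replaced the incremental scan with a membership test against a growing 'checked' list and an early return by a build-then-count decomposition: collect the non-'.' entries once and compare the list's length with its set's length.
import Mathlib
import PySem

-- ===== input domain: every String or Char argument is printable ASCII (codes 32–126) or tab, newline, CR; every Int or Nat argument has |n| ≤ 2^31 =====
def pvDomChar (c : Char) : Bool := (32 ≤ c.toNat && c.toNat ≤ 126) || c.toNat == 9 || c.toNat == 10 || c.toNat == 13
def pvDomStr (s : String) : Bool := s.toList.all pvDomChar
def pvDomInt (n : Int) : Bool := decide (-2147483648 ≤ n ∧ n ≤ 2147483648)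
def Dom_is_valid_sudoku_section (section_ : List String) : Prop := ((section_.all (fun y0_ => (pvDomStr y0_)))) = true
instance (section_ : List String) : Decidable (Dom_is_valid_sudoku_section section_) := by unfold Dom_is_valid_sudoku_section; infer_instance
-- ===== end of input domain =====

-- B replaces A's incremental membership-scan with early return by a build-then-count
-- decomposition (filter once, compare list length with set length); objective: simpler.


-- ===== PORT A =====
-- the loop over `section` carrying the `checked` accumulator, with early return False
def pvGoA : List String → List String → Bool
  | [], _ => true
  | n :: rest, checked =>
    if n ≠ "." then
      if checked.contains n then false
      else pvGoA rest (checked ++ [n])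
    else pvGoA rest checked

def is_valid_sudoku_section (section_ : List String) : Bool := pvGoA section_ []

-- ===== PORT B =====
def is_valid_sudoku_section_alt (section_ : List String) : Bool :=
  let digits := section_.filter (fun n => n ≠ ".")
  digits.length == (PySem.Set.ofList digits).length

-- ===== PRECONDITION & SPEC =====
def Spec_is_valid_sudoku_section (section_ : List String) (out : Bool) : Prop := out = is_valid_sudoku_section_alt section_
instance (section_ : List String) (out : Bool) : Decidable (Spec_is_valid_sudoku_section section_ out) := by unfold Spec_is_valid_sudoku_section; infer_instance

-- ===== CLAIM (what is proved, stated in full; the proofs are below) =====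
def Claim_equal_is_valid_sudoku_section : Prop := ∀ (section_ : List String), Dom_is_valid_sudoku_section section_ → Spec_is_valid_sudoku_section section_ (is_valid_sudoku_section section_)

-- ===== LEMMAS AND PROOFS =====

theorem pv_length_discard_le {α : Type} [BEq α] (s : List α) (x : α) :
    (PySem.Set.discard s x).length ≤ s.length := by
  simp [PySem.Set.discard]
  exact List.length_filter_le _ _

theorem pv_ofList_length_lt {α : Type} [BEq α] [LawfulBEq α] (xs : List α)
    (h : ¬ xs.Nodup) : (PySem.Set.ofList xs).length < xs.length := by
  induction xs with
  | nil => simp at h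
  | cons x rest ih =>
    rw [PySem.Set.ofList_cons]
    by_cases hn : rest.Nodup
    · have hx : x ∈ rest := by
        by_contra hx
        exact h (List.nodup_cons.mpr ⟨hx, hn⟩)
      rw [PySem.Set.ofList_eq_self_of_nodup rest hn]
      have hlt : (PySem.Set.discard rest x).length < rest.length := by
        have hsub : (PySem.Set.discard rest x).length ≤ rest.length :=
          pv_length_discard_le rest x
        rcases lt_or_eq_of_le hsub with hlt | heq
        · exact hlt
        · exfalso
          have hxmem : x ∉ PySem.Set.discard rest x := by
            intro hmem
            exact ((PySem.Set.mem_discard _ _ _).mp hmem).2 rfl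
          have hsubl : (PySem.Set.discard rest x).Sublist rest := by
            simp only [PySem.Set.discard]
            exact List.filter_sublist
          have := List.Sublist.eq_of_length hsubl heq
          rw [this] at hxmem
          exact hxmem hx
      simpa using hlt
    · have h1 := ih hn
      have h2 : (PySem.Set.discard (PySem.Set.ofList rest) x).length ≤
          (PySem.Set.ofList rest).length := pv_length_discard_le _ x
      simp only [List.length_cons]
      omega

-- invariant of A's loop: with a duplicate-free `checked`, the loop answers whether
-- `checked` followed by the non-'.' entries of the remaining list is duplicate-free
theorem pv_goA_eq (l : List String) : ∀ checked : List String, checked.Nodup →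
    pvGoA l checked = decide ((checked ++ l.filter (fun n => n ≠ ".")).Nodup) := by
  induction l with
  | nil => intro checked h; simp [pvGoA, h]
  | cons n rest ih =>
    intro checked h
    by_cases hdot : n = "."
    · have hf : (n :: rest).filter (fun n => n ≠ ".") = rest.filter (fun n => n ≠ ".") := by
        simp [hdot]
      rw [hf, show pvGoA (n :: rest) checked = pvGoA rest checked from by simp [pvGoA, hdot]]
      exact ih checked h
    · have hf : (n :: rest).filter (fun n => n ≠ ".") = n :: rest.filter (fun n => n ≠ ".") := by
        simp [hdot]
      rw [hf, show pvGoA (n :: rest) checked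
          = (if checked.contains n then false else pvGoA rest (checked ++ [n])) from by
        simp [pvGoA, hdot]]
      by_cases hmem : checked.contains n
      · rw [if_pos hmem]
        have hn : n ∈ checked := by simpa using hmem
        have hnot : ¬ (checked ++ n :: rest.filter (fun n => n ≠ ".")).Nodup := by
          intro hnd
          exact List.disjoint_of_nodup_append hnd hn (List.mem_cons_self ..)
        exact (decide_eq_false hnot).symm
      · rw [if_neg hmem]
        have hn : n ∉ checked := by simpa using hmem
        have hck : (checked ++ [n]).Nodup := by
          refine List.Nodup.append h (List.nodup_singleton n) ?_
          intro a ha hb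
          simp at hb
          subst hb
          exact hn ha
        rw [ih (checked ++ [n]) hck, List.append_assoc, List.singleton_append]

-- ===== VERDICT (by name: the statement is the Claim_ definition above) =====
theorem is_valid_sudoku_section_spec : Claim_equal_is_valid_sudoku_section := by
  intro section_ _
  unfold Spec_is_valid_sudoku_section is_valid_sudoku_section
  rw [pv_goA_eq section_ [] List.nodup_nil, List.nil_append,
    show is_valid_sudoku_section_alt section_
      = ((section_.filter (fun n => n ≠ ".")).length
          == (PySem.Set.ofList (section_.filter (fun n => n ≠ "."))).length) from rfl]
  by_cases hnd : (section_.filter (fun n => n ≠ ".")).Nodup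
  · rw [decide_eq_true hnd, PySem.Set.ofList_eq_self_of_nodup _ hnd]
    exact (beq_self_eq_true _).symm
  · rw [decide_eq_false hnd]
    have hlt := pv_ofList_length_lt _ hnd
    exact (beq_eq_false_iff_ne.mpr (by omega)).symm
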